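-- pv_equiv track=rewrite | github.com/WenzhengZhang/TACO | src/taco/utils.py | find_all_markers
-- ===== SOURCE A (Python) =====
-- def find_all_markers(template: str):
--     """
--     Find all markers' names (quoted in "<>") in a template.
--     """
--     markers = []
--     start = 0
--     while True:
--         start = template.find("<", start)
--         if start == -1:
--             break
--         end = template.find(">", start)
--         if end == -1:
--             break
--         markers.append(template[start + 1:end])
--         start = end + 1
--     return markers
-- ===== SOURCE B (Python) =====
-- def find_all_markers(template: str):
--     """Single-pass state machine: flag whether we are inside <...>, buffer of chars."""
--     markers = []
--     inside = False
--     buf = []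
--     for c in template:
--         if not inside and c == '<':
--             inside = True
--             buf = []
--         elif inside and c == '>':
--             markers.append(''.join(buf))
--             inside = False
--         elif inside:
--             buf.append(c)
--     return markers
-- ===== Notes on version B (the rewrite author's own statement) =====
-- stated objective: alternative
-- what changed: Replaced the find-and-jump while loop (repeated str.find with an index cursor and slicing) by a single-pass character state machine maintaining an inside-flag, a buffer and the marker list.
import Mathlib
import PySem

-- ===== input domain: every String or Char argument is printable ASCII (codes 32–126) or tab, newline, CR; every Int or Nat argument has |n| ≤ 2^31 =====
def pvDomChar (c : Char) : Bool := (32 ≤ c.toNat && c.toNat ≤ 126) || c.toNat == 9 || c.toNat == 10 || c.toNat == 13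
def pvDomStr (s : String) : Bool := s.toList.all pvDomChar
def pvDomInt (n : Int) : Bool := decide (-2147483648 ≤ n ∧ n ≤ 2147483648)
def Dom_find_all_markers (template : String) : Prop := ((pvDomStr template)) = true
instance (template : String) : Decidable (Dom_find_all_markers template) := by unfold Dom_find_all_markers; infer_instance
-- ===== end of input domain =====

-- B is a single-pass character state machine (inside-flag + buffer) instead of A's
-- find-and-jump loop; same return value, objective: alternative decomposition.

-- ===== PORT A =====
-- A's loop on the suffix of the string from `start`:
-- `template.find("<", start)` = index of first '<' in the suffix (dropWhile finds it),
-- `template.find(">", start)` = first '>' at or after the '<'; since the char at `start`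
-- is '<' ≠ '>', this is the first '>' strictly after it (takeWhile on the rest),
-- `template[start+1:end]` = the chars between them, and `start = end + 1` = the suffix
-- after the '>' (drop). Each step of this recursion is one iteration of A's while loop.
def find_all_markers_core (cs : List Char) : List String :=
  if hne : cs.dropWhile (fun c => c ≠ '<') = [] then []   -- find("<", start) == -1
  else
    let rest := (cs.dropWhile (fun c => c ≠ '<')).tail    -- chars after the '<'
    let pre := rest.takeWhile (fun c => c ≠ '>')
    if pre.length = rest.length then []                   -- find(">", start) == -1
    else String.ofList pre :: find_all_markers_core (rest.drop (pre.length + 1))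
termination_by cs.length
decreasing_by
  have h1 : (cs.dropWhile (fun c => c ≠ '<')).length ≤ cs.length :=
    List.length_dropWhile_le _ _
  have h0 : (cs.dropWhile (fun c => c ≠ '<')).length ≠ 0 := by
    simpa [List.length_eq_zero_iff] using hne
  simp only [List.length_drop, List.length_tail] at *
  omega

def find_all_markers (template : String) : List String :=
  find_all_markers_core template.toList

-- ===== PORT B =====
-- one step of B's loop body, state = (inside, buf, markers)
def pvStepB (st : Bool × List Char × List String) (c : Char) :
    Bool × List Char × List String :=
  match st with
  | (inside, buf, markers) =>
    if !inside && c == '<' then (true, [], markers)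
    else if inside && c == '>' then (false, buf, markers ++ [String.ofList buf])
    else if inside then (true, buf ++ [c], markers)
    else (inside, buf, markers)

def find_all_markers_alt (template : String) : List String :=
  (template.toList.foldl pvStepB (false, [], [])).2.2

-- ===== PRECONDITION & SPEC =====
def Spec_find_all_markers (template : String) (out : List String) : Prop := out = find_all_markers_alt template
instance (template : String) (out : List String) : Decidable (Spec_find_all_markers template out) := by unfold Spec_find_all_markers; infer_instance

-- ===== CLAIM (what is proved, stated in full; the proofs are below) =====
def Claim_equal_find_all_markers : Prop := ∀ (template : String), Dom_find_all_markers template → Spec_find_all_markers template (find_all_markers template)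

-- ===== LEMMAS AND PROOFS =====

-- what A computes after having consumed a '<' with `buf` already collected
def pvPhase2 (buf cs : List Char) : List String :=
  let pre := cs.takeWhile (fun c => c ≠ '>')
  if pre.length = cs.length then []
  else String.ofList (buf ++ pre) :: find_all_markers_core (cs.drop (pre.length + 1))

theorem pvCore_nil : find_all_markers_core [] = [] := by
  rw [find_all_markers_core]
  simp

theorem pvCore_cons_lt (cs : List Char) :
    find_all_markers_core ('<' :: cs) = pvPhase2 [] cs := by
  rw [find_all_markers_core]
  simp [pvPhase2, List.dropWhile]

theorem pvCore_cons_ne (c : Char) (cs : List Char) (h : c ≠ '<') :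
    find_all_markers_core (c :: cs) = find_all_markers_core cs := by
  rw [find_all_markers_core, find_all_markers_core]
  simp [List.dropWhile, h]

theorem pvPhase2_nil (buf : List Char) : pvPhase2 buf [] = [] := by
  simp [pvPhase2]

theorem pvPhase2_gt (buf cs : List Char) :
    pvPhase2 buf ('>' :: cs) = String.ofList buf :: find_all_markers_core cs := by
  simp [pvPhase2, List.takeWhile]

theorem pvPhase2_ne (buf : List Char) (c : Char) (cs : List Char) (h : c ≠ '>') :
    pvPhase2 buf (c :: cs) = pvPhase2 (buf ++ [c]) cs := by
  simp only [pvPhase2]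
  rw [List.takeWhile_cons_of_pos (by simp [h])]
  simp only [List.length_cons, Nat.add_right_cancel_iff]
  split_ifs with h1
  · rfl
  · simp [List.drop_succ_cons, List.append_assoc]

theorem pvFold_core :
    ∀ cs : List Char,
      (∀ buf acc, (cs.foldl pvStepB (false, buf, acc)).2.2 = acc ++ find_all_markers_core cs)
      ∧ (∀ buf acc, (cs.foldl pvStepB (true, buf, acc)).2.2 = acc ++ pvPhase2 buf cs) := by
  intro cs
  induction cs with
  | nil => simp [pvCore_nil, pvPhase2_nil]
  | cons c cs ih =>
    constructor
    · intro buf acc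
      by_cases hc : c = '<'
      · subst hc
        simp only [List.foldl_cons, pvStepB]
        rw [if_pos (by simp)]
        simp only [pvCore_cons_lt]
        exact (ih.2 [] acc)
      · simp only [List.foldl_cons, pvStepB]
        rw [if_neg (by simp [hc]), if_neg (by simp), if_neg (by simp)]
        rw [pvCore_cons_ne c cs hc]
        exact ih.1 buf acc
    · intro buf acc
      by_cases hc : c = '>'
      · subst hc
        simp only [List.foldl_cons, pvStepB]
        rw [if_neg (by simp), if_pos (by simp)]
        rw [pvPhase2_gt]
        rw [ih.1 buf (acc ++ [String.ofList buf])]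
        simp
      · simp only [List.foldl_cons, pvStepB]
        rw [if_neg (by simp), if_neg (by simp [hc]), if_pos (by simp)]
        rw [pvPhase2_ne buf c cs hc]
        exact ih.2 (buf ++ [c]) acc

-- ===== VERDICT (by name: the statement is the Claim_ definition above) =====
theorem find_all_markers_spec : Claim_equal_find_all_markers := by
  intro template _
  unfold Spec_find_all_markers find_all_markers find_all_markers_alt
  exact ((pvFold_core template.toList).1 [] []).symm
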